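-- pv_equiv track=rewrite | github.com/mhulden/pyfoma | src/pyfoma/lexd.py | _tokenize_symbols
-- ===== SOURCE A (Python) =====
-- from typing import List, Tuple, Dict, Optional, Iterable, Set
--
-- def _tokenize_symbols(x: str) -> List[str]:
--     x = x.strip()
--     out: List[str] = []
--     i = 0
--     while i < len(x):
--         if x[i] == "<":
--             j = x.find(">", i + 1)
--             if j == -1:
--                 raise ValueError(f"Unclosed <...> tag in {x!r}")
--             out.append(x[i : j + 1])
--             i = j + 1
--             continue
--         if x[i] == "{":
--             j = x.find("}", i + 1)
--             if j == -1:
--                 raise ValueError(f"Unclosed {{...}} archisymbol in {x!r}")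
--             out.append(x[i : j + 1])  # keep braces as part of the multichar symbol, e.g. {A}
--             i = j + 1
--             continue
--         out.append(x[i])
--         i += 1
--     return out
-- ===== SOURCE B (Python) =====
-- import re
--
-- _TOKEN_RE = re.compile(r'<[^>]*>|\{[^}]*\}|.', re.DOTALL)
--
-- def _tokenize_symbols(x: str):
--     x = x.strip()
--     out = []
--     for m in _TOKEN_RE.finditer(x):
--         tok = m.group()
--         if tok == "<":  # the tag alternative failed: no '>' follows this '<'
--             raise ValueError(f"Unclosed <...> tag in {x!r}")
--         if tok == "{":  # the archisymbol alternative failed: no '}' follows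
--             raise ValueError(f"Unclosed {{...}} archisymbol in {x!r}")
--         out.append(tok)
--     return out
-- ===== Notes on version B (the rewrite author's own statement) =====
-- stated objective: idiomatic
-- what changed: Replaced the hand-rolled index loop with per-character branch dispatch and str.find by a single compiled regex alternation <[^>]*>|\{[^}]*\}|. driven by re.finditer, raising on the bare-bracket sentinel tokens.
import Mathlib
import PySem

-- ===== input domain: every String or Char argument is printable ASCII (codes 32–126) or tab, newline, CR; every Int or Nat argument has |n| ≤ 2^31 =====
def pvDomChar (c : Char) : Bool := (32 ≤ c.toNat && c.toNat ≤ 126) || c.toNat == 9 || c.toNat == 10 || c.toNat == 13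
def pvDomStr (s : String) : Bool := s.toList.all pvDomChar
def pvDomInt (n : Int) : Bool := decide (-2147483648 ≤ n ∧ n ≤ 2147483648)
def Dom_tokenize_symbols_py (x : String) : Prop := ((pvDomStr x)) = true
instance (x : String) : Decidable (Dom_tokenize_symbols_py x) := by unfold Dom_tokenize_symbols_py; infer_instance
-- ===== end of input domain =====

-- B replaces A's explicit index loop (str.find + slicing) by a single regex pass
-- `<[^>]*>|\{[^}]*\}|.` with re.DOTALL (objective: idiomatic; same O(n) cost).
-- Both A and B raise ValueError on an unclosed top-level '<'/'{'; Pre_ excludes exactly those inputs.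


-- ===== PORT A =====
-- A's while loop over the stripped string, transliterated as recursion on the
-- remaining suffix (the loop only ever looks at x[i:]): at the current position,
-- '<' → j = x.find('>', i+1), slice x[i:j+1] (= c :: take (j+1) of the suffix) and
-- continue at i = j+1 (= drop (j+1)); '{' → likewise with '}'; otherwise emit x[i].
-- find = -1 is the `none` branch: Python raises ValueError there (the port stops
-- with the tokens so far); Pre_ excludes those inputs.
def tokenize_symbols_py_go : List Char → List String
  | [] => []
  | c :: r =>
    if c = '<' then
      match r.findIdx? (· = '>') with
      | none => []
      | some j => String.ofList (c :: r.take (j + 1)) :: tokenize_symbols_py_go (r.drop (j + 1))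
    else if c = '{' then
      match r.findIdx? (· = '}') with
      | none => []
      | some j => String.ofList (c :: r.take (j + 1)) :: tokenize_symbols_py_go (r.drop (j + 1))
    else String.ofList [c] :: tokenize_symbols_py_go r
termination_by s => s.length
decreasing_by all_goals (simp [List.length_drop]; try omega)

def tokenize_symbols_py (x : String) : List String :=
  tokenize_symbols_py_go (PySem.Str.strip x).toList

-- ===== PORT B =====
-- B drives tokenization with the regex `<[^>]*>|\{[^}]*\}|.` (re.DOTALL) via
-- re.finditer. `pvRegexMatch` is an exact hand port of that alternation at the
-- current position: `[^>]*` is takeWhile (· ≠ '>'); the first alternative succeeds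
-- iff a '>' remains (dropWhile nonempty; its head is that '>'), otherwise `.`
-- matches the single char (DOTALL: any char, '\n' included). It returns
-- (matched text, rest of the input).
def pvRegexMatch (c : Char) (r : List Char) : String × List Char :=
  if c = '<' then
    match r.dropWhile (· ≠ '>') with
    | [] => ("<", r)
    | _ :: tb => (String.ofList ('<' :: r.takeWhile (· ≠ '>') ++ ['>']), tb)
  else if c = '{' then
    match r.dropWhile (· ≠ '}') with
    | [] => ("{", r)
    | _ :: tb => (String.ofList ('{' :: r.takeWhile (· ≠ '}') ++ ['}']), tb)
  else (String.ofList [c], r)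

theorem pvRegexMatch_rest_le (c : Char) (r : List Char) :
    (pvRegexMatch c r).2.length ≤ r.length := by
  have hgt : (r.dropWhile (· ≠ '>')).length ≤ r.length := List.length_dropWhile_le _ _
  have hbr : (r.dropWhile (· ≠ '}')).length ≤ r.length := List.length_dropWhile_le _ _
  unfold pvRegexMatch
  split_ifs
  · cases hd : r.dropWhile (· ≠ '>') with
    | nil => simp
    | cons a tb => rw [hd] at hgt; simp at hgt ⊢; omega
  · cases hd : r.dropWhile (· ≠ '}') with
    | nil => simp
    | cons a tb => rw [hd] at hbr; simp at hbr ⊢; omega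
  · simp

-- the for-loop over finditer: append each match; the bare-bracket sentinel tokens
-- "<" / "{" are exactly where B raises ValueError (the port stops there; outside Pre_)
def tokenize_symbols_py_alt_go : List Char → List String
  | [] => []
  | c :: r =>
    let m := pvRegexMatch c r
    if m.1 = "<" ∨ m.1 = "{" then []
    else m.1 :: tokenize_symbols_py_alt_go m.2
termination_by s => s.length
decreasing_by
  have := pvRegexMatch_rest_le c r
  simp; omega

def tokenize_symbols_py_alt (x : String) : List String :=
  tokenize_symbols_py_alt_go (PySem.Str.strip x).toList

-- ===== PRECONDITION & SPEC =====
-- Pre_: on the stripped input, every '<' opened at token level has a later '>' and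
-- every '{' a later '}' — exactly the inputs on which Python A returns normally
-- (on all others A — and B alike — raises ValueError). Stated as a two-state
-- scanner: `none` = outside a bracket token, `some t` = waiting for the closer t.
def pvScan (st : Option Char) (c : Char) : Option Char :=
  match st with
  | some t => if c = t then none else some t
  | none => if c = '<' then some '>' else if c = '{' then some '}' else none


def Pre_tokenize_symbols_py (x : String) : Prop :=
  (PySem.Str.strip x).toList.foldl pvScan none = none

instance (x : String) : Decidable (Pre_tokenize_symbols_py x) := by
  unfold Pre_tokenize_symbols_py; infer_instance

def pvWitness_tokenize_symbols_py : String := "a<b>{c}d"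

def Spec_tokenize_symbols_py (x : String) (out : List String) : Prop := out = tokenize_symbols_py_alt x
instance (x : String) (out : List String) : Decidable (Spec_tokenize_symbols_py x out) := by unfold Spec_tokenize_symbols_py; infer_instance

-- ===== CLAIM (what is proved, stated in full; the proofs are below) =====
def Claim_equal_tokenize_symbols_py : Prop := ∀ (x : String), Dom_tokenize_symbols_py x → Pre_tokenize_symbols_py x → Spec_tokenize_symbols_py x (tokenize_symbols_py x)

-- ===== LEMMAS AND PROOFS =====

-- bridge between A's findIdx? view and B's takeWhile/dropWhile view of the same scan
theorem find_none_drop (ch : Char) (r : List Char)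
    (h : r.findIdx? (· = ch) = none) : r.dropWhile (· ≠ ch) = [] := by
  rw [List.findIdx?_eq_none_iff] at h
  rw [List.dropWhile_eq_nil_iff]
  intro x hx
  simpa using h x hx

theorem find_some_split (ch : Char) (r : List Char) (j : Nat)
    (h : r.findIdx? (· = ch) = some j) :
    r.takeWhile (· ≠ ch) = r.take j ∧
    r.dropWhile (· ≠ ch) = ch :: r.drop (j + 1) ∧
    r.take (j + 1) = r.take j ++ [ch] := by
  induction r generalizing j with
  | nil => simp at h
  | cons a t ih =>
    rw [List.findIdx?_cons] at h
    by_cases hac : a = ch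
    · rw [if_pos (by simpa using hac)] at h
      cases h
      subst hac
      exact ⟨by simp, by simp, by simp⟩
    · rw [if_neg (by simpa using hac)] at h
      simp only [Option.map_eq_some_iff] at h
      obtain ⟨j', hj', rfl⟩ := h
      obtain ⟨h1, h2, h3⟩ := ih j' hj'
      refine ⟨?_, ?_, by simp [h3]⟩
      · rw [List.takeWhile_cons, if_pos (by simpa using hac), h1]; simp
      · rw [List.dropWhile_cons, if_pos (by simpa using hac), h2, List.drop_succ_cons]

-- running the scanner in the waiting state consumes everything up to the closer
theorem scan_some (t : Char) (r : List Char) :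
    List.foldl pvScan (some t) r =
      (match r.dropWhile (· ≠ t) with
       | [] => some t
       | _ :: tb => List.foldl pvScan none tb) := by
  induction r with
  | nil => simp
  | cons a r' ih =>
    by_cases hat : a = t
    · subst hat
      simp [pvScan]
    · rw [List.foldl_cons, List.dropWhile_cons, if_pos (by simpa using hat)]
      rw [show pvScan (some t) a = some t by simp [pvScan, hat]]
      exact ih

theorem go_eq (s : List Char) (hwf : s.foldl pvScan none = none) :
    tokenize_symbols_py_go s = tokenize_symbols_py_alt_go s := by
  induction s using tokenize_symbols_py_go.induct with
  | case1 => simp [tokenize_symbols_py_go, tokenize_symbols_py_alt_go]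
  | case2 r hfind =>
    rw [List.foldl_cons, show pvScan none '<' = some '>' by rfl, scan_some,
        find_none_drop _ _ hfind] at hwf
    simp at hwf
  | case3 r j hfind ih =>
    obtain ⟨h1, h2, h3⟩ := find_some_split '>' r j hfind
    rw [List.foldl_cons, show pvScan none '<' = some '>' by rfl, scan_some, h2] at hwf
    have hne : ¬(String.ofList ('<' :: (r.take j ++ ['>'])) = "<" ∨
                 String.ofList ('<' :: (r.take j ++ ['>'])) = "{") := by
      rintro (he | he) <;> exact absurd (congrArg String.toList he) (by simp)
    simp only [tokenize_symbols_py_go, tokenize_symbols_py_alt_go, pvRegexMatch,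
               hfind, h1, h2, h3, if_true, List.cons_append]
    rw [if_neg hne, ih hwf]
  | case4 r hfind _ =>
    rw [List.foldl_cons, show pvScan none '{' = some '}' by rfl, scan_some,
        find_none_drop _ _ hfind] at hwf
    simp at hwf
  | case5 r j hfind _ ih =>
    obtain ⟨h1, h2, h3⟩ := find_some_split '}' r j hfind
    rw [List.foldl_cons, show pvScan none '{' = some '}' by rfl, scan_some, h2] at hwf
    have hne : ¬(String.ofList ('{' :: (r.take j ++ ['}'])) = "<" ∨
                 String.ofList ('{' :: (r.take j ++ ['}'])) = "{") := by
      rintro (he | he) <;> exact absurd (congrArg String.toList he) (by simp)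
    have hbl : ¬('{' : Char) = '<' := by decide
    simp only [tokenize_symbols_py_go, tokenize_symbols_py_alt_go, pvRegexMatch, if_neg hbl,
               hfind, h1, h2, h3, if_true, List.cons_append]
    rw [if_neg hne, ih hwf]
  | case6 c r hc1 hc2 ih =>
    rw [List.foldl_cons, show pvScan none c = none by simp [pvScan, hc1, hc2]] at hwf
    have hne : ¬(String.ofList [c] = "<" ∨ String.ofList [c] = "{") := by
      rintro (he | he) <;>
        · have h' := congrArg String.toList he
          simp at h'
          first | exact hc1 h' | exact hc2 h'
    simp only [tokenize_symbols_py_go, tokenize_symbols_py_alt_go, pvRegexMatch,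
               if_neg hc1, if_neg hc2, List.cons_append]
    rw [if_neg hne, ih hwf]

-- ===== VERDICT (by name: the statement is the Claim_ definition above) =====
theorem tokenize_symbols_py_spec : Claim_equal_tokenize_symbols_py := by
  intro x _ hpre
  unfold Spec_tokenize_symbols_py tokenize_symbols_py tokenize_symbols_py_alt
  exact go_eq _ hpre
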